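-- pv_equiv track=rewrite | github.com/h-lu/bidScoring | bid_scoring/pipeline/application/scoring_provider.py | _merge_unique_warnings
-- ===== SOURCE A (Python) =====
-- def _merge_unique_warnings(existing: list[str], additions: list[str]) -> list[str]:
--     merged = list(existing)
--     seen = set(merged)
--     for warning in additions:
--         if warning in seen:
--             continue
--         seen.add(warning)
--         merged.append(warning)
--     return merged
-- ===== SOURCE B (Python) =====
-- def _merge_unique_warnings(existing: list[str], additions: list[str]) -> list[str]:
--     combined = list(existing) + list(additions)
--     first = {}
--     for i, w in enumerate(combined):
--         if w not in first:
--             first[w] = i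
--     return [w for i, w in enumerate(combined) if i < len(existing) or first[w] == i]
-- ===== Notes on version B (the rewrite author's own statement) =====
-- stated objective: alternative
-- what changed: A grows a result list and a seen-set in lockstep in one stateful pass; B concatenates the two lists, builds a first-occurrence-index map over the concatenation in a separate pass, and then keeps each element by a positional criterion (inside the existing prefix, or at its own first-occurrence index) - no membership set of existing and no result grown during the scan.
import Mathlib
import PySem

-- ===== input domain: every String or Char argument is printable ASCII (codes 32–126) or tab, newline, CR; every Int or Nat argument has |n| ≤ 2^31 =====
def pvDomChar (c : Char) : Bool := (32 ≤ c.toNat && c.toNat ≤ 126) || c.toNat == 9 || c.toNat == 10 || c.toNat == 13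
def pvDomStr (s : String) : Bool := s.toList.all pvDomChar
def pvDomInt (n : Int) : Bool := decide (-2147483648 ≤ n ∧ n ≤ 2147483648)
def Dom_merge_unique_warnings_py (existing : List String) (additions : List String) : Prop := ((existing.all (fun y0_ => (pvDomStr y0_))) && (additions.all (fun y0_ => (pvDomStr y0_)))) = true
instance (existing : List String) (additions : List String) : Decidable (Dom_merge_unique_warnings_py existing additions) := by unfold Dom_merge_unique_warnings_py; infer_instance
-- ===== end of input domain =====

-- B replaces A's stateful pass (result list + seen-set grown in lockstep) by staged passes over
-- the concatenation: build a first-occurrence-index map once, then keep each element by a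
-- positional criterion (inside the existing prefix, or at its own first-occurrence index).


-- ===== PORT A =====
def merge_unique_warnings_py (existing : List String) (additions : List String) : List String :=
  let merged := existing
  let seen : PySem.Set String := PySem.Set.ofList merged
  let st := additions.foldl
    (fun (st : List String × PySem.Set String) warning =>
      if PySem.Set.contains st.2 warning then st
      else (st.1 ++ [warning], PySem.Set.add st.2 warning))
    (merged, seen)
  st.1

-- ===== PORT B =====
-- Python's `first[w] == i` is ported as `get? … == some i`: every w of combined is a key of first.
def merge_unique_warnings_py_alt (existing : List String) (additions : List String) : List String :=
  let combined := existing ++ additions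
  let first := (PySem.List.enumerate combined).foldl
    (fun (d : PySem.Dict String Int) p =>
      if PySem.Dict.contains d p.2 then d else PySem.Dict.insert d p.2 p.1)
    PySem.Dict.empty
  ((PySem.List.enumerate combined).filter
    (fun p => decide (p.1 < (existing.length : Int)) || (PySem.Dict.get? first p.2 == some p.1))).map Prod.snd

-- ===== PRECONDITION & SPEC =====
def Spec_merge_unique_warnings_py (existing : List String) (additions : List String) (out : List String) : Prop := out = merge_unique_warnings_py_alt existing additions
instance (existing : List String) (additions : List String) (out : List String) : Decidable (Spec_merge_unique_warnings_py existing additions out) := by unfold Spec_merge_unique_warnings_py; infer_instance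

-- ===== CLAIM (what is proved, stated in full; the proofs are below) =====
def Claim_equal_merge_unique_warnings_py : Prop := ∀ (existing : List String) (additions : List String), Dom_merge_unique_warnings_py existing additions → Spec_merge_unique_warnings_py existing additions (merge_unique_warnings_py existing additions)

-- ===== LEMMAS AND PROOFS =====

-- A's loop step
def stepA (st : List String × PySem.Set String) (warning : String) : List String × PySem.Set String :=
  if PySem.Set.contains st.2 warning then st
  else (st.1 ++ [warning], PySem.Set.add st.2 warning)

-- invariant of A's fold: seen and merged agree as sets, and merged's members are existing ∪ adds
theorem foldA_inv (adds : List String) (m : List String) (s : PySem.Set String)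
    (h : ∀ x, x ∈ s ↔ x ∈ m) :
    (∀ x, x ∈ (adds.foldl stepA (m, s)).2 ↔ x ∈ (adds.foldl stepA (m, s)).1) ∧
    (∀ x, x ∈ (adds.foldl stepA (m, s)).1 ↔ x ∈ m ∨ x ∈ adds) := by
  induction adds generalizing m s with
  | nil => simpa using h
  | cons w r ih =>
    simp only [List.foldl_cons, stepA]
    by_cases hw : PySem.Set.contains s w = true
    · rw [if_pos hw]
      have hwm : w ∈ m := (h w).mp ((PySem.Set.contains_iff s w).mp hw)
      obtain ⟨h1, h2⟩ := ih m s h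
      refine ⟨h1, fun x => ?_⟩
      rw [h2 x]
      constructor
      · rintro (hx | hx) <;> simp [hx]
      · rintro (hx | hx)
        · exact Or.inl hx
        · rcases List.mem_cons.mp hx with hx | hx
          · exact Or.inl (hx ▸ hwm)
          · exact Or.inr hx
    · rw [if_neg hw]
      have h' : ∀ x, x ∈ PySem.Set.add s w ↔ x ∈ m ++ [w] := by
        intro x
        rw [PySem.Set.mem_add, List.mem_append, List.mem_singleton, h x]
      obtain ⟨h1, h2⟩ := ih (m ++ [w]) (PySem.Set.add s w) h'
      refine ⟨h1, fun x => ?_⟩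
      rw [h2 x]
      simp only [List.mem_append, List.mem_cons]
      tauto


-- B's tail for a given full additions list
def tailB (existing adds : List String) : List String :=
  ((PySem.List.enumerate adds).filter
    (fun p => !(existing.contains p.2) && ((PySem.List.index? adds p.2).map Int.ofNat == some p.1))).map Prod.snd

theorem tailB_append (existing adds : List String) (w : String) :
    tailB existing (adds ++ [w])
      = tailB existing adds ++ (if w ∉ existing ∧ w ∉ adds then [w] else []) := by
  unfold tailB
  rw [PySem.List.enumerate_append, List.filter_append, List.map_append]
  congr 1
  · -- prefix entries: index? over adds ++ [w] agrees with index? over adds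
    congr 1
    apply List.filter_congr
    intro p hp
    rcases (PySem.List.mem_enumerate_iff adds 0 p).mp hp with ⟨k, hk, rfl⟩
    have hmem : adds[k] ∈ adds := List.getElem_mem hk
    rw [PySem.List.index?_append_of_mem [w] hmem]
  · -- the final entry (0 + adds.length, w)
    rw [PySem.List.enumerate_cons, PySem.List.enumerate_nil]
    by_cases hex : w ∈ existing
    · have hcon : existing.contains w = true := List.elem_eq_true_of_mem hex
      rw [if_neg (fun h => h.1 hex)]
      simp only [List.filter_cons, List.filter_nil]
      simp [hex]
    · have hcon : existing.contains w = false := by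
        simp [List.contains_eq_mem, hex]
      by_cases had : w ∈ adds
      · -- first index of w is < adds.length, so the position test fails
        have hk' : PySem.List.index? (adds ++ [w]) w = PySem.List.index? adds w :=
          PySem.List.index?_append_of_mem [w] had
        obtain ⟨k, hk⟩ := Option.isSome_iff_exists.mp
          ((PySem.List.index?_isSome_iff adds w).mpr had)
        obtain ⟨hlt, -⟩ := PySem.List.getElem_of_index?_eq_some hk
        have hne : ((PySem.List.index? (adds ++ [w]) w).map Int.ofNat
            == some ((0 : Int) + adds.length)) = false := by
          rw [hk', hk]
          simp only [Option.map_some, beq_eq_false_iff_ne, ne_eq, Option.some.injEq,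
            Int.ofNat_eq_natCast]
          omega
        have hkk : List.idxOf? w (adds ++ [w]) = some k := by
          rw [← PySem.List.index?_eq_idxOf?, hk', hk]
        rw [if_neg (fun h => h.2 had)]
        simp only [List.filter_cons, List.filter_nil]
        simp [hkk]
        omega
      · have hidx : PySem.List.index? (adds ++ [w]) w = some adds.length :=
          PySem.List.index?_append_singleton_self adds w had
        have hidx' : List.idxOf? w (adds ++ [w]) = some adds.length := by
          rw [← PySem.List.index?_eq_idxOf?, hidx]
        rw [if_pos ⟨hex, had⟩]
        simp only [List.filter_cons, List.filter_nil]
        simp [hex, hidx']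

theorem foldA_rfl (existing adds : List String) :
    merge_unique_warnings_py existing adds
      = (adds.foldl stepA (existing, PySem.Set.ofList existing)).1 := rfl

theorem merge_eq (existing adds : List String) :
    merge_unique_warnings_py existing adds = existing ++ tailB existing adds := by
  induction adds using List.reverseRecOn with
  | nil => simp [merge_unique_warnings_py, tailB, PySem.List.enumerate_nil]
  | append_singleton r w ih =>
    have hA : merge_unique_warnings_py existing (r ++ [w])
        = (stepA (r.foldl stepA (existing, PySem.Set.ofList existing)) w).1 := by
      rw [foldA_rfl, List.foldl_append]
      rfl
    obtain ⟨h1, h2⟩ := foldA_inv r existing (PySem.Set.ofList existing)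
      (fun x => PySem.Set.mem_ofList existing x)
    rw [hA, tailB_append, stepA]
    set st := r.foldl stepA (existing, PySem.Set.ofList existing) with hst
    by_cases hw : w ∈ existing ∨ w ∈ r
    · have hmem : w ∈ st.2 := (h1 w).mpr ((h2 w).mpr hw)
      have hc : PySem.Set.contains st.2 w = true := (PySem.Set.contains_iff st.2 w).mpr hmem
      rw [if_pos hc]
      have hne : ¬ (w ∉ existing ∧ w ∉ r) := by tauto
      rw [if_neg hne, List.append_nil, ← ih, foldA_rfl]
    · have hmem : w ∉ st.2 := fun hh => hw ((h2 w).mp ((h1 w).mp hh))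
      have hc : ¬ PySem.Set.contains st.2 w = true := fun hh =>
        hmem ((PySem.Set.contains_iff st.2 w).mp hh)
      rw [if_neg hc]
      have hyes : w ∉ existing ∧ w ∉ r := by tauto
      rw [if_pos hyes]
      show st.1 ++ [w] = existing ++ (tailB existing r ++ [w])
      rw [← List.append_assoc, ← ih, foldA_rfl]


-- the first-occurrence map built by B's first loop
theorem first_get? (xs : List String) (s : Int) (d : PySem.Dict String Int) (w : String) :
    PySem.Dict.get?
      ((PySem.List.enumerate xs s).foldl
        (fun (d : PySem.Dict String Int) p =>
          if PySem.Dict.contains d p.2 then d else PySem.Dict.insert d p.2 p.1) d) w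
      = if PySem.Dict.contains d w then PySem.Dict.get? d w
        else (PySem.List.index? xs w).map (fun k : Nat => s + (k : Int)) := by
  induction xs generalizing s d with
  | nil =>
    rw [PySem.List.enumerate_nil]
    simp only [List.foldl_nil, PySem.List.index?_eq_idxOf?, List.idxOf?_nil, Option.map_none]
    by_cases hw : PySem.Dict.contains d w = true
    · rw [if_pos hw]
    · rw [if_neg hw]
      rw [PySem.Dict.contains_eq_isSome_get?] at hw
      exact Option.not_isSome_iff_eq_none.mp hw
  | cons x xs ih =>
    rw [PySem.List.enumerate_cons, List.foldl_cons]
    by_cases hx : PySem.Dict.contains d x = true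
    · rw [if_pos hx, ih]
      by_cases hw : w = x
      · subst hw
        rw [if_pos hx, if_pos hx]
      · by_cases hdw : PySem.Dict.contains d w = true
        · rw [if_pos hdw, if_pos hdw]
        · rw [if_neg hdw, if_neg hdw,
            PySem.List.index?_cons_of_ne xs (Ne.symm hw), Option.map_map]
          apply congrFun
          apply congrArg
          funext k
          show s + 1 + (k : Int) = s + ((k + 1 : Nat) : Int)
          push_cast
          ring
    · rw [if_neg hx, ih]
      by_cases hw : w = x
      · subst hw
        rw [if_pos (PySem.Dict.contains_insert_self d w s), if_neg hx,
          PySem.Dict.get?_insert_self, PySem.List.index?_cons_self]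
        simp
      · have hcon : PySem.Dict.contains (PySem.Dict.insert d x s) w = PySem.Dict.contains d w := by
          rw [PySem.Dict.contains_insert]
          simp [hw]
        have hget : PySem.Dict.get? (PySem.Dict.insert d x s) w = PySem.Dict.get? d w :=
          PySem.Dict.get?_insert_of_ne d s hw
        rw [hcon, hget, PySem.List.index?_cons_of_ne xs (Ne.symm hw), Option.map_map]
        by_cases hdw : PySem.Dict.contains d w = true
        · rw [if_pos hdw, if_pos hdw]
        · rw [if_neg hdw, if_neg hdw]
          apply congrFun
          apply congrArg
          funext k
          show s + 1 + (k : Int) = s + ((k + 1 : Nat) : Int)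
          push_cast
          ring

theorem index?_append_of_not_mem {l t : List String} {w : String} (h : w ∉ l) :
    PySem.List.index? (l ++ t) w = (PySem.List.index? t w).map (· + l.length) := by
  induction l with
  | nil =>
    simp only [List.nil_append, List.length_nil]
    cases PySem.List.index? t w <;> simp
  | cons a l ih =>
    have ha : a ≠ w := fun hh => h (hh ▸ List.mem_cons_self)
    rw [List.cons_append, PySem.List.index?_cons_of_ne (l ++ t) ha,
      ih (fun hh => h (List.mem_cons_of_mem a hh)), Option.map_map]
    cases PySem.List.index? t w with
    | none => simp
    | some k =>
      simp only [Option.map_some, Option.some.injEq, List.length_cons, Function.comp]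
      omega

theorem enumerate_shift (xs : List String) (s t : Int) :
    PySem.List.enumerate xs (s + t) = (PySem.List.enumerate xs t).map (fun p => (p.1 + s, p.2)) := by
  induction xs generalizing t with
  | nil => rw [PySem.List.enumerate_nil, PySem.List.enumerate_nil, List.map_nil]
  | cons x xs ih =>
    rw [PySem.List.enumerate_cons, PySem.List.enumerate_cons, List.map_cons]
    have h1 : s + t = t + s := by ring
    have h2 : s + t + 1 = s + (t + 1) := by ring
    rw [h2, ih (t + 1), h1]

theorem alt_eq (existing adds : List String) :
    merge_unique_warnings_py_alt existing adds = existing ++ tailB existing adds := by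
  unfold merge_unique_warnings_py_alt tailB
  dsimp only []
  have hF : ∀ w, PySem.Dict.get?
      ((PySem.List.enumerate (existing ++ adds)).foldl
        (fun (d : PySem.Dict String Int) p =>
          if PySem.Dict.contains d p.2 then d else PySem.Dict.insert d p.2 p.1)
        PySem.Dict.empty) w
      = (PySem.List.index? (existing ++ adds) w).map (fun k : Nat => (0 : Int) + (k : Int)) := by
    intro w
    rw [first_get? (existing ++ adds) 0 PySem.Dict.empty w,
      if_neg (by rw [PySem.Dict.contains_empty]; simp)]
  set F := (PySem.List.enumerate (existing ++ adds)).foldl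
    (fun (d : PySem.Dict String Int) p =>
      if PySem.Dict.contains d p.2 then d else PySem.Dict.insert d p.2 p.1)
    PySem.Dict.empty with hFdef
  clear_value F
  rw [PySem.List.enumerate_append, List.filter_append, List.map_append]
  congr 1
  · -- the existing prefix is kept whole
    have hself : List.filter
        (fun p => decide (p.1 < (existing.length : Int)) || (PySem.Dict.get? F p.2 == some p.1))
        (PySem.List.enumerate existing) = PySem.List.enumerate existing := by
      apply List.filter_eq_self.mpr
      intro p hp
      rcases (PySem.List.mem_enumerate_iff existing 0 p).mp hp with ⟨k, hk, rfl⟩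
      have hd : (decide ((0 : Int) + k < (existing.length : Int))) = true :=
        decide_eq_true (by omega)
      rw [hd, Bool.true_or]
    rw [hself, PySem.List.map_snd_enumerate]
  · -- the additions suffix: positional first-occurrence criterion = tailB's criterion
    have hsh : PySem.List.enumerate adds (0 + (existing.length : Int))
        = (PySem.List.enumerate adds 0).map
            (fun p => (p.1 + (existing.length : Int), p.2)) := by
      rw [← enumerate_shift]
      norm_num
    rw [hsh, List.filter_map, List.map_map]
    have hsnd : (Prod.snd ∘ fun (p : Int × String) => (p.1 + (existing.length : Int), p.2))
        = Prod.snd := by funext p; rfl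
    rw [hsnd]
    congr 1
    apply List.filter_congr
    intro p hp
    rcases (PySem.List.mem_enumerate_iff adds 0 p).mp hp with ⟨k, hk, rfl⟩
    have hw : adds[k] ∈ adds := List.getElem_mem hk
    simp only [Function.comp]
    have hlt : (decide ((0 : Int) + k + existing.length < (existing.length : Int))) = false := by
      rw [decide_eq_false_iff_not]
      push_cast
      omega
    rw [hlt, Bool.false_or, hF adds[k]]
    by_cases hex : adds[k] ∈ existing
    · -- already in existing: both sides false
      have hcon : existing.contains adds[k] = true := List.elem_eq_true_of_mem hex
      obtain ⟨j, hj⟩ := Option.isSome_iff_exists.mp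
        ((PySem.List.index?_isSome_iff existing adds[k]).mpr hex)
      obtain ⟨hjlt, -⟩ := PySem.List.getElem_of_index?_eq_some hj
      rw [PySem.List.index?_append_of_mem adds hex, hj]
      simp only [Option.map_some, hcon, Bool.not_true, Bool.false_and,
        beq_eq_false_iff_ne, ne_eq, Option.some.injEq]
      omega
    · have hcon : existing.contains adds[k] = false := by
        simp [List.contains_eq_mem, hex]
      obtain ⟨m, hm⟩ := Option.isSome_iff_exists.mp
        ((PySem.List.index?_isSome_iff adds adds[k]).mpr hw)
      rw [index?_append_of_not_mem hex, hm]
      simp only [Option.map_some, hcon, Bool.not_false, Bool.true_and]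
      rw [Bool.eq_iff_iff]
      simp only [beq_iff_eq, Option.some.injEq, Int.ofNat_eq_natCast]
      omega

-- ===== VERDICT (by name: the statement is the Claim_ definition above) =====
theorem merge_unique_warnings_py_spec : Claim_equal_merge_unique_warnings_py := by
  intro existing additions _
  unfold Spec_merge_unique_warnings_py
  rw [merge_eq, alt_eq]
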